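-- pv_equiv track=rewrite | github.com/acutkosky/recursivecode | src/bpe.py | get_context_stats
-- ===== SOURCE A (Python) =====
-- from typing import List, Set, Optional, Tuple, Dict, Union, NamedTuple
--
-- def get_context_stats(tokens: List[int], vocab: Optional[Set[int]]):
--     """Calculate statistics about token sequences in different contexts.
--
--     specifically, we return a dictionary such thatfor each pair of possible tokens X,Y
--     and each string S = X...Y appearing in the input token list such that X and Y do not appear in the interior of the string,
--     result[X][Y][S[1:]] = # of times S appears in the input token list.
--
--     Args:
--         tokens: List of token IDs to analyze
--         vocab: Optional set of vocabulary tokens to consider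
--
--     Returns:
--         Dictionary containing statistics about token sequences in different contexts
--     """
--     # build stats dictionaries
--     stats = {context: {token: {} for token in vocab} for context in vocab}
--
--     # build "starting point" index lookup
--
--     start_idx = {v: -1 for v in vocab}
--
--     for idx, token in enumerate(tokens):
--
--         # update the string finders for all the other tokens
--
--         for v in vocab:
--             start = start_idx[v]
--             if start != -1:
--                 sub_string = tuple(tokens[start + 1 : idx + 1])
--                 stats[v][token][sub_string] = stats[v][token].get(sub_string, 0) + 1
--         # restart the string finder for the current token
--         start_idx[token] = idx
--
--     return stats
-- ===== SOURCE B (Python) =====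
-- def get_context_stats(tokens, vocab):
--     # Forward-scan re-implementation: for each start position s whose token is in
--     # vocab, scan forward recording substrings until the start token reappears.
--     stats = {c: {t: {} for t in vocab} for c in vocab}
--     n = len(tokens)
--     for s in range(n):
--         row = stats.get(tokens[s])
--         if row is None:
--             continue
--         X = tokens[s]
--         for end in range(s + 1, n):
--             t = tokens[end]
--             sub = tuple(tokens[s + 1:end + 1])
--             inner = row[t]
--             inner[sub] = inner.get(sub, 0) + 1
--             if t == X:
--                 break
--     return stats
-- ===== Notes on version B (the rewrite author's own statement) =====
-- stated objective: alternative
-- what changed: Replaces A's last-occurrence index table and per-index loop over the whole vocabulary by independent forward scans: for each start position whose token is in vocab, scan forward recording each substring until the start token reappears, then break.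
import Mathlib
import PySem

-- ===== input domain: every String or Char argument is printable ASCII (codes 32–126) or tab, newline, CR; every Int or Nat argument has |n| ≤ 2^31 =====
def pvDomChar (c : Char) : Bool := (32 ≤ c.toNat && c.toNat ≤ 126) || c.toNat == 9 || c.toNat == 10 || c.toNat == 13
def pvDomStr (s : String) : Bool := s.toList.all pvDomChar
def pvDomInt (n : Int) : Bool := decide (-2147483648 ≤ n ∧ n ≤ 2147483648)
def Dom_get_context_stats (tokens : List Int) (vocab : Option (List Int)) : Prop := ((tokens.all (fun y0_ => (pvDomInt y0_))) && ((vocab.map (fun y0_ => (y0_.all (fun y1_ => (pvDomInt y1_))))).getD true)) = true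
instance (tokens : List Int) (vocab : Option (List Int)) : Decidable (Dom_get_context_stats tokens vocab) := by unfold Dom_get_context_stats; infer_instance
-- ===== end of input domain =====

-- B replaces A's per-index scan over the whole vocabulary (driven by a last-occurrence
-- table) with independent forward scans from each in-vocab start position; same result.

abbrev PvRow := PySem.Dict Int (PySem.Dict (List Int) Int)
abbrev PvStats := PySem.Dict Int PvRow

-- ===== PORT A =====
def get_context_stats (tokens : List Int) (vocab : Option (List Int)) : List (Int × List (Int × List (List Int × Int))) :=
  match vocab with
  | none => []  -- Python raises TypeError iterating None; excluded by Pre_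
  | some V =>
    -- stats = {context: {token: {} for token in vocab} for context in vocab}
    let stats0 : PvStats :=
      V.foldl (fun d c => d.insert c (V.foldl (fun d2 t => d2.insert t PySem.Dict.empty) PySem.Dict.empty)) PySem.Dict.empty
    -- start_idx = {v: -1 for v in vocab}
    let start0 : PySem.Dict Int Int := V.foldl (fun d v => d.insert v (-1)) PySem.Dict.empty
    -- for idx, token in enumerate(tokens): …
    let res := (PySem.List.enumerate tokens).foldl
      (fun (st : PvStats × PySem.Dict Int Int) (p : Int × Int) =>
        let stats := V.foldl (fun stats v =>
            let start := st.2.getD v (-1)   -- start_idx[v]; v is always a key of start_idx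
            if start ≠ -1 then
              let sub := PySem.List.slice tokens (some (start + 1)) (some (p.1 + 1))
              -- stats[v][token][sub] = stats[v][token].get(sub, 0) + 1  (token in vocab under Pre_)
              stats.modify v PySem.Dict.empty (fun row =>
                row.modify p.2 PySem.Dict.empty (fun inner => inner.insert sub (inner.getD sub 0 + 1)))
            else stats) st.1
        (stats, st.2.insert p.2 p.1))
      (stats0, start0)
    res.1.items.map (fun q => (q.1, q.2.items.map (fun r => (r.1, r.2.items))))

-- ===== PORT B =====
-- inner `for end in range(s+1, n): … if t == X: break` loop of Source B
def pvBScan (tokens : List Int) (X : Int) (s : Nat) : List Nat → PvRow → PvRow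
  | [], row => row
  | e :: rest, row =>
    let t := tokens.getD e 0
    let sub := PySem.List.slice tokens (some ((s : Int) + 1)) (some ((e : Int) + 1))
    let row' := row.modify t PySem.Dict.empty (fun inner => inner.insert sub (inner.getD sub 0 + 1))
    if t = X then row' else pvBScan tokens X s rest row'

def get_context_stats_alt (tokens : List Int) (vocab : Option (List Int)) : List (Int × List (Int × List (List Int × Int))) :=
  match vocab with
  | none => []  -- Python raises TypeError iterating None; excluded by Pre_
  | some V =>
    let stats0 : PvStats :=
      V.foldl (fun d c => d.insert c (V.foldl (fun d2 t => d2.insert t PySem.Dict.empty) PySem.Dict.empty)) PySem.Dict.empty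
    -- for s in range(n): row = stats.get(tokens[s]); if row is None: continue; …
    let res := (List.range tokens.length).foldl (fun stats s =>
        match stats.get? (tokens.getD s 0) with
        | none => stats
        | some row => stats.insert (tokens.getD s 0)
            (pvBScan tokens (tokens.getD s 0) s (List.range' (s+1) (tokens.length - (s+1))) row)) stats0
    res.items.map (fun q => (q.1, q.2.items.map (fun r => (r.1, r.2.items))))

-- ===== PRECONDITION & SPEC =====
-- Pre_ excludes exactly the inputs where the Python A raises: vocab=None (TypeError) and a
-- token outside vocab occurring after an in-vocab token (KeyError on stats[v][token]).
-- The Nodup clause is the Python set invariant: vocab is a Python set, so its elements are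
-- distinct; it excludes no Python input.
def Pre_get_context_stats (tokens : List Int) (vocab : Option (List Int)) : Prop :=
  vocab.isSome = true ∧ (vocab.getD []).Nodup ∧
  ∀ j, j < tokens.length → ∀ i, i < j →
    tokens.getD i 0 ∈ vocab.getD [] → tokens.getD j 0 ∈ vocab.getD []
instance (tokens : List Int) (vocab : Option (List Int)) : Decidable (Pre_get_context_stats tokens vocab) := by
  unfold Pre_get_context_stats; infer_instance

def pvWitness_get_context_stats : List Int × Option (List Int) := ([1, 2, 1], some [1, 2])

def Spec_get_context_stats (tokens : List Int) (vocab : Option (List Int)) (out : List (Int × List (Int × List (List Int × Int)))) : Prop := out = get_context_stats_alt tokens vocab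
instance (tokens : List Int) (vocab : Option (List Int)) (out : List (Int × List (Int × List (List Int × Int)))) : Decidable (Spec_get_context_stats tokens vocab out) := by unfold Spec_get_context_stats; infer_instance

-- ===== CLAIM (what is proved, stated in full; the proofs are below) =====
def Claim_equal_get_context_stats : Prop := ∀ (tokens : List Int) (vocab : Option (List Int)), Dom_get_context_stats tokens vocab → Pre_get_context_stats tokens vocab → Spec_get_context_stats tokens vocab (get_context_stats tokens vocab)

-- ===== LEMMAS AND PROOFS =====

-- the row update both programs perform for one recorded (token, substring) event
def pvUpd (row : PvRow) (ev : Int × List Int) : PvRow :=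
  row.modify ev.1 PySem.Dict.empty (fun inner => inner.insert ev.2 (inner.getD ev.2 0 + 1))

-- a stats dict whose keys are exactly V, with row r v at key v
def pvMk (V : List Int) (r : Int → PvRow) : PvStats := PySem.Dict.mk (V.map (fun v => (v, r v)))

-- the (token, substring) events recorded for start-token v, scanning l = ts.drop k with
-- st = position of the last occurrence of v before k (if any)
def pvEvs (ts : List Int) (v : Int) : List Int → Nat → Option Nat → List (Int × List Int)
  | [], _, _ => []
  | t :: rest, k, st =>
    (match st with
     | some s => [(t, (ts.drop (s+1)).take (k - s))]
     | none => []) ++ pvEvs ts v rest (k+1) (if t = v then some k else st)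

def pvOptInt : Option Nat → Int
  | none => -1
  | some s => (s : Int)

-- events recorded by one pvBScan segment starting after occurrence s
def pvSegE (ts : List Int) (X : Int) (s : Nat) : List Nat → List (Int × List Int)
  | [] => []
  | e :: rest => (ts.getD e 0, (ts.drop (s+1)).take (e - s)) ::
      (if ts.getD e 0 = X then [] else pvSegE ts X s rest)

-- first occurrence of X at a position ≥ k
def pvFo (ts : List Int) (X : Int) (k : Nat) : Option Nat :=
  (List.findIdx? (fun t => t = X) (ts.drop k)).map (· + k)

-- events for start-token v still to be recorded by B's outer loop from position s on
def pvRemB (ts : List Int) (v : Int) (s : Nat) : List (Int × List Int) :=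
  match pvFo ts v s with
  | none => []
  | some s0 => pvEvs ts v (ts.drop (s0+1)) (s0+1) (some s0)

theorem pvMk_keys (V : List Int) (r : Int → PvRow) : (pvMk V r).keys = V := by
  simp only [pvMk, PySem.Dict.keys]
  show (V.map (fun v => (v, r v))).map (fun p => p.1) = V
  rw [List.map_map]
  simp only [Function.comp_def]
  exact List.map_id' V

theorem pvMk_getD (V : List Int) (hnd : V.Nodup) (r : Int → PvRow) (v : Int) (hv : v ∈ V) (d : PvRow) :
    (pvMk V r).getD v d = r v := by
  have hm : (v, r v) ∈ (pvMk V r).items := by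
    simp only [pvMk]
    exact List.mem_map.mpr ⟨v, hv, rfl⟩
  exact PySem.Dict.getD_of_mem_items _ hm (by rw [pvMk_keys]; exact hnd) d

theorem pvMk_get?_some (V : List Int) (hnd : V.Nodup) (r : Int → PvRow) (v : Int) (hv : v ∈ V) :
    (pvMk V r).get? v = some (r v) := by
  have hm : (v, r v) ∈ (pvMk V r).items := by
    simp only [pvMk]
    exact List.mem_map.mpr ⟨v, hv, rfl⟩
  exact PySem.Dict.get?_of_mem_items _ hm (by rw [pvMk_keys]; exact hnd)

theorem pvMk_get?_none (V : List Int) (r : Int → PvRow) (v : Int) (hv : v ∉ V) :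
    (pvMk V r).get? v = none := by
  rw [PySem.Dict.get?_eq_none_iff_not_mem_keys, pvMk_keys]; exact hv

theorem pvMk_insert (V : List Int) (r : Int → PvRow) (v : Int) (hv : v ∈ V) (w : PvRow) :
    (pvMk V r).insert v w = pvMk V (fun u => if u = v then w else r u) := by
  have hc : (pvMk V r).contains v = true := by
    rw [PySem.Dict.contains_eq_decide_mem_keys, pvMk_keys]; simpa using hv
  apply PySem.Dict.ext
  rw [PySem.Dict.items_insert_of_contains _ _ hc]
  show ((V.map (fun v => (v, r v))).map (fun p => if p.1 == v then (v, w) else p))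
      = V.map (fun u => (u, if u = v then w else r u))
  rw [List.map_map]
  apply List.map_congr_left
  intro u _
  by_cases h : u = v
  · subst h; simp
  · simp [h]

theorem pvMk_congr (V : List Int) (r r' : Int → PvRow) (h : ∀ v ∈ V, r v = r' v) :
    pvMk V r = pvMk V r' := by
  unfold pvMk
  congr 1
  apply List.map_congr_left
  intro v hv
  rw [h v hv]

theorem pvStats0_eq (V : List Int) (hnd : V.Nodup) (R : PvRow) :
    V.foldl (fun d c => d.insert c R) PySem.Dict.empty = pvMk V (fun _ => R) := by
  apply PySem.Dict.ext
  have := PySem.Dict.items_foldl_insert_fresh (l := V) (k := fun a => a) (v := fun _ => R)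
    (d := PySem.Dict.empty) (by intro a _; simp) (by simpa)
  simpa [pvMk] using this

theorem pvStart0_getD (V : List Int) (v : Int) :
    (V.foldl (fun d v => d.insert v (-1)) PySem.Dict.empty).getD v (-1) = -1 := by
  have key : ∀ (d : PySem.Dict Int Int), d.getD v (-1) = -1 →
      (V.foldl (fun d v => d.insert v (-1)) d).getD v (-1) = -1 := by
    intro d hd
    induction V generalizing d with
    | nil => simpa using hd
    | cons a l ih =>
      simp only [List.foldl_cons]
      apply ih
      rw [PySem.Dict.getD_insert]
      split <;> simp [hd]
  exact key _ (by simp)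

-- the inner `for v in vocab` loop of A acts pointwise on a pvMk stats dict
theorem pvMk_foldl_modify (V : List Int) (hnd : V.Nodup) (c : Int → Prop) [DecidablePred c]
    (g : Int → PvRow → PvRow) :
    ∀ (W : List Int), W.Nodup → (∀ w ∈ W, w ∈ V) → ∀ (r : Int → PvRow),
      W.foldl (fun stats v => if c v then stats.modify v PySem.Dict.empty (g v) else stats) (pvMk V r)
        = pvMk V (fun v => if v ∈ W ∧ c v then g v (r v) else r v) := by
  intro W
  induction W with
  | nil =>
    intro _ _ r
    simp only [List.foldl_nil]
    apply pvMk_congr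
    intro v _
    simp
  | cons w W' ih =>
    intro hWnd hWV r
    have hwV : w ∈ V := hWV w (List.mem_cons_self)
    have hwW' : w ∉ W' := (List.nodup_cons.mp hWnd).1
    simp only [List.foldl_cons]
    have hstep : (if c w then (pvMk V r).modify w PySem.Dict.empty (g w) else pvMk V r)
        = pvMk V (fun u => if u = w ∧ c w then g u (r u) else r u) := by
      by_cases hc : c w
      · rw [if_pos hc]
        show (pvMk V r).insert w (g w ((pvMk V r).getD w PySem.Dict.empty))
            = pvMk V (fun u => if u = w ∧ c w then g u (r u) else r u)
        rw [pvMk_getD V hnd r w hwV, pvMk_insert V r w hwV]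
        apply pvMk_congr
        intro v _
        by_cases hvw : v = w
        · subst hvw; simp [hc]
        · simp [hvw]
      · rw [if_neg hc]
        apply pvMk_congr
        intro v _
        simp [hc]
    rw [hstep, ih (List.nodup_cons.mp hWnd).2 (fun x hx => hWV x (List.mem_cons_of_mem _ hx))]
    apply pvMk_congr
    intro v _
    by_cases hvw : v = w
    · subst hvw
      rw [if_neg (fun h : v ∈ W' ∧ c v => hwW' h.1)]
      by_cases hc : c v
      · rw [if_pos ⟨rfl, hc⟩, if_pos ⟨List.mem_cons_self, hc⟩]
      · rw [if_neg (fun h : v = v ∧ c v => hc h.2), if_neg (fun h : v ∈ v :: W' ∧ c v => hc h.2)]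
    · have hiff : (v ∈ W' ∧ c v) ↔ (v ∈ w :: W' ∧ c v) := by
        constructor
        · rintro ⟨hm, hc⟩
          exact ⟨List.mem_cons_of_mem _ hm, hc⟩
        · rintro ⟨hm, hc⟩
          rcases List.mem_cons.mp hm with h | h
          · exact absurd h hvw
          · exact ⟨h, hc⟩
      rw [show (if v = w ∧ c w then g v (r v) else r v) = r v from if_neg (fun h => hvw h.1)]
      exact if_congr hiff rfl rfl

theorem pvBScan_eq (ts : List Int) (X : Int) (s : Nat) :
    ∀ (ends : List Nat) (row : PvRow),
      pvBScan ts X s ends row = (pvSegE ts X s ends).foldl pvUpd row := by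
  intro ends
  induction ends with
  | nil => intro row; rfl
  | cons e rest ih =>
    intro row
    have hslice : PySem.List.slice ts (some ((s : Int) + 1)) (some ((e : Int) + 1))
        = (ts.drop (s+1)).take (e - s) := by
      have h1 : ((s : Int) + 1) = ((s + 1 : Nat) : Int) := by push_cast; ring
      have h2 : ((e : Int) + 1) = ((e + 1 : Nat) : Int) := by push_cast; ring
      rw [h1, h2, PySem.List.slice_natCast]
      congr 1
      omega
    show (let t := ts.getD e 0;
          let sub := PySem.List.slice ts (some ((s : Int) + 1)) (some ((e : Int) + 1));
          let row' := row.modify t PySem.Dict.empty (fun inner => inner.insert sub (inner.getD sub 0 + 1));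
          if t = X then row' else pvBScan ts X s rest row')
        = (pvSegE ts X s (e :: rest)).foldl pvUpd row
    simp only [pvSegE]
    by_cases hX : ts.getD e 0 = X
    · simp only [hX, List.foldl_cons, pvUpd, hslice]
      simp
    · simp only [if_neg hX, List.foldl_cons]
      rw [ih]
      simp only [pvUpd, hslice]

theorem pvDrop_cons {ts l : List Int} {t : Int} {k : Nat} (h : ts.drop k = t :: l) :
    ts.getD k 0 = t ∧ l = ts.drop (k+1) := by
  constructor
  · have h0 : ts.getD k 0 = (ts.drop k).getD 0 0 := by
      rw [List.getD_eq_getElem?_getD, List.getD_eq_getElem?_getD, List.getElem?_drop]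
      simp
    rw [h0, h]; rfl
  · have h1 : ts.drop (k+1) = (ts.drop k).tail := List.tail_drop.symm
    rw [h1, h]; rfl

theorem pvRemB_ne (ts : List Int) (v : Int) (s : Nat) (hs : s < ts.length)
    (h : ts.getD s 0 ≠ v) : pvRemB ts v s = pvRemB ts v (s+1) := by
  obtain ⟨t, l', hd⟩ : ∃ t l', ts.drop s = t :: l' := by
    cases hdd : ts.drop s with
    | nil =>
      exfalso
      have := List.drop_eq_nil_iff.mp hdd
      omega
    | cons a b => exact ⟨a, b, rfl⟩
  obtain ⟨ht, hl'⟩ := pvDrop_cons hd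
  have hf : t ≠ v := by rw [← ht]; exact h
  have hfo : pvFo ts v s = pvFo ts v (s+1) := by
    unfold pvFo
    rw [hd, ← hl', List.findIdx?_cons]
    rw [decide_eq_false hf]
    simp only [Bool.false_eq_true, if_false, Option.map_map]
    congr 1
    funext x
    simp only [Function.comp_apply]
    omega
  unfold pvRemB
  rw [hfo]

theorem pvEvs_split (ts : List Int) (X : Int) :
    ∀ (l : List Int) (k s : Nat), l = ts.drop k →
      pvEvs ts X l k (some s) = pvSegE ts X s (List.range' k l.length) ++ pvRemB ts X k := by
  intro l
  induction l with
  | nil =>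
    intro k s hk
    have hfo : pvFo ts X k = none := by
      unfold pvFo
      rw [← hk]
      simp
    unfold pvRemB
    rw [hfo]
    simp [pvEvs, pvSegE]
  | cons t l' ih =>
    intro k s hk
    obtain ⟨ht, hl'⟩ := pvDrop_cons hk.symm
    have hklen : k < ts.length := by
      by_contra hge
      rw [List.drop_eq_nil_of_le (by omega)] at hk
      exact List.cons_ne_nil _ _ hk
    rw [List.length_cons, List.range'_succ]
    by_cases hX : t = X
    · have hfo : pvFo ts X k = some k := by
        unfold pvFo
        rw [← hk, List.findIdx?_cons]
        simp [hX]
      have hrem : pvRemB ts X k = pvEvs ts X l' (k+1) (some k) := by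
        unfold pvRemB
        rw [hfo]
        show pvEvs ts X (List.drop (k+1) ts) (k+1) (some k) = _
        rw [← hl']
      have ht2 : ts[k]?.getD 0 = X := by
        rw [← List.getD_eq_getElem?_getD, ht]
        exact hX
      rw [hrem]
      simp [pvEvs, pvSegE, hX, ht2]
    · have hne : ts.getD k 0 ≠ X := by rw [ht]; exact hX
      simp only [pvEvs, pvSegE, ht, if_neg hX]
      rw [ih (k+1) s hl', ← pvRemB_ne ts X k hklen hne]
      simp

theorem pvEvs_none (ts : List Int) (X : Int) :
    ∀ (l : List Int) (k : Nat), l = ts.drop k →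
      pvEvs ts X l k none = pvRemB ts X k := by
  intro l
  induction l with
  | nil =>
    intro k hk
    have hfo : pvFo ts X k = none := by
      unfold pvFo
      rw [← hk]
      simp
    unfold pvRemB
    rw [hfo]
    simp [pvEvs]
  | cons t l' ih =>
    intro k hk
    obtain ⟨ht, hl'⟩ := pvDrop_cons hk.symm
    have hklen : k < ts.length := by
      by_contra hge
      rw [List.drop_eq_nil_of_le (by omega)] at hk
      exact List.cons_ne_nil _ _ hk
    by_cases hX : t = X
    · have hfo : pvFo ts X k = some k := by
        unfold pvFo
        rw [← hk, List.findIdx?_cons]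
        simp [hX]
      have hrem : pvRemB ts X k = pvEvs ts X l' (k+1) (some k) := by
        unfold pvRemB
        rw [hfo]
        show pvEvs ts X (List.drop (k+1) ts) (k+1) (some k) = _
        rw [← hl']
      rw [hrem]
      simp [pvEvs, hX]
    · have hne : ts.getD k 0 ≠ X := by rw [ht]; exact hX
      simp only [pvEvs, if_neg hX, List.nil_append]
      rw [ih (k+1) hl', ← pvRemB_ne ts X k hklen hne]

theorem pvDrop_eq (ts : List Int) (s : Nat) (hs : s < ts.length) :
    ts.drop s = ts.getD s 0 :: ts.drop (s+1) := by
  rw [List.drop_eq_getElem_cons hs]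
  congr 1
  rw [List.getD_eq_getElem?_getD, List.getElem?_eq_getElem hs]
  rfl

-- A's main loop, generalized over the remaining suffix
theorem pvA_loop (ts V : List Int) (hnd : V.Nodup) :
    ∀ (l : List Int) (k : Nat) (f : Int → Option Nat) (r : Int → PvRow) (std : PySem.Dict Int Int),
      l = ts.drop k →
      (∀ v, std.getD v (-1) = pvOptInt (f v)) →
      ((PySem.List.enumerate l (k : Int)).foldl
        (fun (st : PvStats × PySem.Dict Int Int) (p : Int × Int) =>
          (V.foldl (fun stats v =>
              if st.2.getD v (-1) ≠ -1 then
                stats.modify v PySem.Dict.empty (fun row =>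
                  row.modify p.2 PySem.Dict.empty (fun inner =>
                    inner.insert (PySem.List.slice ts (some (st.2.getD v (-1) + 1)) (some (p.1 + 1)))
                      (inner.getD (PySem.List.slice ts (some (st.2.getD v (-1) + 1)) (some (p.1 + 1))) 0 + 1)))
              else stats) st.1,
           st.2.insert p.2 p.1))
        (pvMk V r, std)).1
      = pvMk V (fun v => (pvEvs ts v l k (f v)).foldl pvUpd (r v)) := by
  intro l
  induction l with
  | nil =>
    intro k f r std _ _
    simp only [PySem.List.enumerate_nil, List.foldl_nil]
    apply pvMk_congr
    intro v _
    simp [pvEvs]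
  | cons t l' ih =>
    intro k f r std hk hstd
    obtain ⟨ht, hl'⟩ := pvDrop_cons hk.symm
    rw [PySem.List.enumerate_cons, List.foldl_cons]
    have h1 : V.foldl (fun stats v =>
          if std.getD v (-1) ≠ -1 then
            stats.modify v PySem.Dict.empty (fun row =>
              row.modify t PySem.Dict.empty (fun inner =>
                inner.insert (PySem.List.slice ts (some (std.getD v (-1) + 1)) (some ((k : Int) + 1)))
                  (inner.getD (PySem.List.slice ts (some (std.getD v (-1) + 1)) (some ((k : Int) + 1))) 0 + 1)))
          else stats) (pvMk V r)
        = pvMk V (fun v => if v ∈ V ∧ std.getD v (-1) ≠ -1 then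
            pvUpd (r v) (t, PySem.List.slice ts (some (std.getD v (-1) + 1)) (some ((k : Int) + 1))) else r v) :=
      pvMk_foldl_modify V hnd _ _ V hnd (fun w hw => hw) r
    dsimp only
    rw [h1]
    have hstd' : ∀ v, (std.insert t (k : Int)).getD v (-1)
        = pvOptInt (if t = v then some k else f v) := by
      intro v
      rw [PySem.Dict.getD_insert]
      by_cases hvt : v = t
      · simp [hvt, pvOptInt]
      · simp [hvt, show t ≠ v from fun h => hvt h.symm, hstd v]
    have hA := ih (k+1) (fun v => if t = v then some k else f v)
      (fun v => if v ∈ V ∧ std.getD v (-1) ≠ -1 then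
        pvUpd (r v) (t, PySem.List.slice ts (some (std.getD v (-1) + 1)) (some ((k : Int) + 1))) else r v)
      (std.insert t (k : Int)) hl' hstd'
    have hcast : PySem.List.enumerate l' ((k : Int) + 1)
        = PySem.List.enumerate l' (((k + 1 : Nat) : Int)) := by norm_num
    rw [hcast, hA]
    apply pvMk_congr
    intro v hv
    cases hf : f v with
    | none =>
      have hc : ¬ (v ∈ V ∧ std.getD v (-1) ≠ -1) := by
        rintro ⟨-, hcc⟩
        exact hcc (by rw [hstd v, hf]; rfl)
      simp only [pvEvs, hf, List.nil_append, if_neg hc]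
    | some s =>
      have hgd : std.getD v (-1) = (s : Int) := by rw [hstd v, hf]; rfl
      have hc : v ∈ V ∧ std.getD v (-1) ≠ -1 := ⟨hv, by rw [hgd]; omega⟩
      have hslice : PySem.List.slice ts (some (std.getD v (-1) + 1)) (some ((k : Int) + 1))
          = (ts.drop (s+1)).take (k - s) := by
        rw [hgd]
        have hc1 : ((s : Int) + 1) = ((s + 1 : Nat) : Int) := by push_cast; ring
        have hc2 : ((k : Int) + 1) = ((k + 1 : Nat) : Int) := by push_cast; ring
        rw [hc1, hc2, PySem.List.slice_natCast]
        congr 1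
        omega
      simp only [pvEvs, hf, if_pos hc, hslice, List.foldl_append, List.foldl_cons, List.foldl_nil]

-- B's main loop, generalized over the remaining positions
theorem pvB_loop (ts V : List Int) (hnd : V.Nodup) :
    ∀ (m : Nat) (s : Nat) (r : Int → PvRow), m = ts.length - s →
      ((List.range' s m).foldl (fun stats s =>
          match stats.get? (ts.getD s 0) with
          | none => stats
          | some row => stats.insert (ts.getD s 0)
              (pvBScan ts (ts.getD s 0) s (List.range' (s+1) (ts.length - (s+1))) row)) (pvMk V r))
      = pvMk V (fun v => (pvRemB ts v s).foldl pvUpd (r v)) := by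
  intro m
  induction m with
  | zero =>
    intro s r hm
    simp only [List.range'_zero, List.foldl_nil]
    apply pvMk_congr
    intro v _
    have hrem : pvRemB ts v s = [] := by
      unfold pvRemB pvFo
      rw [List.drop_eq_nil_of_le (by omega)]
      simp
    rw [hrem]
    rfl
  | succ m ihm =>
    intro s r hm
    have hs : s < ts.length := by omega
    rw [List.range'_succ, List.foldl_cons]
    by_cases hX : ts.getD s 0 ∈ V
    · have hget : (pvMk V r).get? (ts.getD s 0) = some (r (ts.getD s 0)) :=
        pvMk_get?_some V hnd r _ hX
      have hstep : (match (pvMk V r).get? (ts.getD s 0) with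
            | none => pvMk V r
            | some row => (pvMk V r).insert (ts.getD s 0)
                (pvBScan ts (ts.getD s 0) s (List.range' (s+1) (ts.length - (s+1))) row))
          = pvMk V (fun u => if u = ts.getD s 0 then
              (pvSegE ts (ts.getD s 0) s (List.range' (s+1) (ts.length - (s+1)))).foldl pvUpd (r (ts.getD s 0))
            else r u) := by
        rw [hget]
        show (pvMk V r).insert (ts.getD s 0)
            (pvBScan ts (ts.getD s 0) s (List.range' (s+1) (ts.length - (s+1))) (r (ts.getD s 0))) = _
        rw [pvBScan_eq, pvMk_insert V r _ hX]
      rw [hstep, ihm (s+1) _ (by omega)]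
      apply pvMk_congr
      intro v hv
      by_cases hvX : v = ts.getD s 0
      · have hocc : ts.getD s 0 = v := hvX.symm
        have hocc2 : ts[s]?.getD 0 = v := by
          rw [← List.getD_eq_getElem?_getD]
          exact hocc
        have hfo : pvFo ts v s = some s := by
          unfold pvFo
          rw [pvDrop_eq ts s hs, List.findIdx?_cons]
          simp [hocc2]
        have hrem : pvRemB ts v s = pvEvs ts v (ts.drop (s+1)) (s+1) (some s) := by
          unfold pvRemB
          rw [hfo]
        have hsplit := pvEvs_split ts v (ts.drop (s+1)) (s+1) s rfl
        rw [List.length_drop] at hsplit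
        rw [if_pos hvX, hrem, hsplit, List.foldl_append, hocc, hvX]
      · rw [if_neg hvX, pvRemB_ne ts v s hs (fun h => hvX h.symm)]
    · have hget : (pvMk V r).get? (ts.getD s 0) = none := pvMk_get?_none V r _ hX
      have hstep : (match (pvMk V r).get? (ts.getD s 0) with
            | none => pvMk V r
            | some row => (pvMk V r).insert (ts.getD s 0)
                (pvBScan ts (ts.getD s 0) s (List.range' (s+1) (ts.length - (s+1))) row))
          = pvMk V r := by
        rw [hget]
      rw [hstep, ihm (s+1) r (by omega)]
      apply pvMk_congr
      intro v hv
      rw [pvRemB_ne ts v s hs (fun h => hX (h ▸ hv))]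

-- ===== VERDICT (by name: the statement is the Claim_ definition above) =====
theorem get_context_stats_spec : Claim_equal_get_context_stats := by
  intro tokens vocab _ hpre
  obtain ⟨hs, hnd', _⟩ := hpre
  match vocab with
  | none => simp at hs
  | some V =>
    have hnd : V.Nodup := by simpa using hnd'
    unfold Spec_get_context_stats
    have e0 : V.foldl (fun d c => d.insert c (V.foldl (fun d2 t => d2.insert t PySem.Dict.empty) PySem.Dict.empty)) PySem.Dict.empty
        = pvMk V (fun _ => V.foldl (fun d2 t => d2.insert t PySem.Dict.empty) PySem.Dict.empty) :=
      pvStats0_eq V hnd _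
    have hA2 : ((PySem.List.enumerate tokens 0).foldl
        (fun (st : PvStats × PySem.Dict Int Int) (p : Int × Int) =>
          (V.foldl (fun stats v =>
              if st.2.getD v (-1) ≠ -1 then
                stats.modify v PySem.Dict.empty (fun row =>
                  row.modify p.2 PySem.Dict.empty (fun inner =>
                    inner.insert (PySem.List.slice tokens (some (st.2.getD v (-1) + 1)) (some (p.1 + 1)))
                      (inner.getD (PySem.List.slice tokens (some (st.2.getD v (-1) + 1)) (some (p.1 + 1))) 0 + 1)))
              else stats) st.1,
           st.2.insert p.2 p.1))
        (V.foldl (fun d c => d.insert c (V.foldl (fun d2 t => d2.insert t PySem.Dict.empty) PySem.Dict.empty)) PySem.Dict.empty,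
         V.foldl (fun d v => d.insert v (-1)) PySem.Dict.empty)).1
        = pvMk V (fun v => (pvEvs tokens v tokens 0 none).foldl pvUpd
            (V.foldl (fun d2 t => d2.insert t PySem.Dict.empty) PySem.Dict.empty)) := by
      rw [e0]
      exact pvA_loop tokens V hnd tokens 0 (fun _ => none)
        (fun _ => V.foldl (fun d2 t => d2.insert t PySem.Dict.empty) PySem.Dict.empty)
        (V.foldl (fun d v => d.insert v (-1)) PySem.Dict.empty)
        List.drop_zero.symm (fun v => pvStart0_getD V v)
    have hB2 : ((List.range tokens.length).foldl (fun stats s =>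
          match stats.get? (tokens.getD s 0) with
          | none => stats
          | some row => stats.insert (tokens.getD s 0)
              (pvBScan tokens (tokens.getD s 0) s (List.range' (s+1) (tokens.length - (s+1))) row))
        (V.foldl (fun d c => d.insert c (V.foldl (fun d2 t => d2.insert t PySem.Dict.empty) PySem.Dict.empty)) PySem.Dict.empty))
        = pvMk V (fun v => (pvRemB tokens v 0).foldl pvUpd
            (V.foldl (fun d2 t => d2.insert t PySem.Dict.empty) PySem.Dict.empty)) := by
      rw [e0, List.range_eq_range']
      exact pvB_loop tokens V hnd tokens.length 0
        (fun _ => V.foldl (fun d2 t => d2.insert t PySem.Dict.empty) PySem.Dict.empty) (by omega)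
    have hAfull : get_context_stats tokens (some V)
        = (pvMk V (fun v => (pvEvs tokens v tokens 0 none).foldl pvUpd
            (V.foldl (fun d2 t => d2.insert t PySem.Dict.empty) PySem.Dict.empty))).items.map
          (fun q => (q.1, q.2.items.map (fun r => (r.1, r.2.items)))) :=
      congrArg (fun d => d.items.map (fun q => (q.1, q.2.items.map (fun r => (r.1, r.2.items))))) hA2
    have hBfull : get_context_stats_alt tokens (some V)
        = (pvMk V (fun v => (pvRemB tokens v 0).foldl pvUpd
            (V.foldl (fun d2 t => d2.insert t PySem.Dict.empty) PySem.Dict.empty))).items.map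
          (fun q => (q.1, q.2.items.map (fun r => (r.1, r.2.items)))) :=
      congrArg (fun d => d.items.map (fun q => (q.1, q.2.items.map (fun r => (r.1, r.2.items))))) hB2
    rw [hAfull, hBfull]
    exact congrArg (fun d : PvStats => d.items.map (fun q => (q.1, q.2.items.map (fun r => (r.1, r.2.items)))))
      (pvMk_congr V
        (fun v => (pvEvs tokens v tokens 0 none).foldl pvUpd
          (V.foldl (fun d2 t => d2.insert t PySem.Dict.empty) PySem.Dict.empty))
        (fun v => (pvRemB tokens v 0).foldl pvUpd
          (V.foldl (fun d2 t => d2.insert t PySem.Dict.empty) PySem.Dict.empty))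
        (fun v _ =>
          congrArg (fun l => List.foldl pvUpd
            (V.foldl (fun d2 t => d2.insert t PySem.Dict.empty) PySem.Dict.empty) l)
            (pvEvs_none tokens v tokens 0 List.drop_zero.symm)))
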